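-- pv_equiv track=rewrite | github.com/ridepo/UltraBrick | UltraBrick.py | sort_moves
-- ===== SOURCE A (Python) =====
-- def sort_moves(m_list):
--     cp_list = []
--     positive_mates_list = []
--     negative_mates_list = []
--
--     for m in m_list:
--         if m[1][0] == "cp":
--             cp_list.append(m)
--         if m[1][0] == "mate" and m[1][1] > 0:
--             positive_mates_list.append(m)
--         if m[1][0] == "mate" and m[1][1] < 0:
--             negative_mates_list.append(m)
--
--     positive_mates_list.sort(reverse=False, key=lambda x: x[1][1])
--     cp_list.sort(reverse=True, key=lambda x: x[1][1])
--     negative_mates_list.sort(reverse=False, key=lambda x: x[1][1])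
--
--     return positive_mates_list + cp_list + negative_mates_list
-- ===== SOURCE B (Python) =====
-- def sort_moves(m_list):
--     # One pass: tag each kept move with a (group, value) key, then a single
--     # stable sort on that key reproduces A's three partition-and-sort passes
--     # (cp values are negated so ascending order matches reverse=True).
--     tagged = []
--     for m in m_list:
--         kind, val = m[1][0], m[1][1]
--         if kind == "mate" and val > 0:
--             tagged.append(((0, val), m))
--         elif kind == "cp":
--             tagged.append(((1, -val), m))
--         elif kind == "mate" and val < 0:
--             tagged.append(((2, val), m))
--     tagged.sort(key=lambda t: t[0])
--     return [t[1] for t in tagged]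
-- ===== Notes on version B (the rewrite author's own statement) =====
-- stated objective: simpler
-- what changed: A builds three separate partition lists and sorts each with its own sort call; B makes one pass that tags each kept move with a (group, value) key (negating cp values to emulate reverse=True) and applies a single stable sort on that key.
import Mathlib
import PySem

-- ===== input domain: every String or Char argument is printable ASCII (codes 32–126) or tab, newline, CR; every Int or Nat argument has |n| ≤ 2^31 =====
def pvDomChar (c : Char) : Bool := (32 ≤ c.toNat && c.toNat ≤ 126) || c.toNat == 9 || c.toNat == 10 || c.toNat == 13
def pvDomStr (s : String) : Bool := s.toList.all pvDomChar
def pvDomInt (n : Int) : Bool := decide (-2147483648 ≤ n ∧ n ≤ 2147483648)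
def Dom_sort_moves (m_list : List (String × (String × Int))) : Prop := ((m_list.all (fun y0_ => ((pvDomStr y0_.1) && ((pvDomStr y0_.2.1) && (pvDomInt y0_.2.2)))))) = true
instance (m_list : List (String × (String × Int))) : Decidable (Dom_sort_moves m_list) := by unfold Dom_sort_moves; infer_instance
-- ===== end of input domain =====

-- B replaces A's three partition lists and three sorts by one tag-and-sort pass
-- (one stable sort on a (group, value) key; cp values negated so ascending matches
-- A's reverse=True); same return value, simpler decomposition.

-- ===== PORT A =====
def sort_moves (m_list : List (String × (String × Int))) : List (String × (String × Int)) :=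
  let st := m_list.foldl
    (fun (st : List (String × (String × Int)) × List (String × (String × Int)) × List (String × (String × Int))) m =>
      let st := if m.2.1 == "cp" then (st.1 ++ [m], st.2.1, st.2.2) else st
      let st := if m.2.1 == "mate" && decide (m.2.2 > 0) then (st.1, st.2.1 ++ [m], st.2.2) else st
      let st := if m.2.1 == "mate" && decide (m.2.2 < 0) then (st.1, st.2.1, st.2.2 ++ [m]) else st
      st)
    ([], [], [])
  PySem.List.sorted st.2.1 (fun x => x.2.2) false ++
  PySem.List.sorted st.1 (fun x => x.2.2) true ++
  PySem.List.sorted st.2.2 (fun x => x.2.2) false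

-- ===== PORT B =====
def sort_moves_alt (m_list : List (String × (String × Int))) : List (String × (String × Int)) :=
  let tagged := m_list.foldl
    (fun (acc : List ((Int × Int) × (String × (String × Int)))) m =>
      if m.2.1 == "mate" && decide (m.2.2 > 0) then acc ++ [(((0 : Int), m.2.2), m)]
      else if m.2.1 == "cp" then acc ++ [(((1 : Int), -m.2.2), m)]
      else if m.2.1 == "mate" && decide (m.2.2 < 0) then acc ++ [(((2 : Int), m.2.2), m)]
      else acc)
    []
  (PySem.List.sorted2 tagged (fun t => t.1.1) (fun t => t.1.2) false).map (fun t => t.2)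

-- ===== PRECONDITION & SPEC =====
def Spec_sort_moves (m_list : List (String × (String × Int))) (out : List (String × (String × Int))) : Prop := out = sort_moves_alt m_list
instance (m_list : List (String × (String × Int))) (out : List (String × (String × Int))) : Decidable (Spec_sort_moves m_list out) := by unfold Spec_sort_moves; infer_instance

-- ===== CLAIM (what is proved, stated in full; the proofs are below) =====
def Claim_equal_sort_moves : Prop := ∀ (m_list : List (String × (String × Int))), Dom_sort_moves m_list → Spec_sort_moves m_list (sort_moves m_list)

-- ===== LEMMAS AND PROOFS =====

-- unfolded cons case of PySem.List.insertBy
lemma insertBy_cons {α : Type} (b : α → α → Bool) (x y : α) (ys : List α) :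
    PySem.List.insertBy b x (y :: ys) = if b x y then x :: y :: ys else y :: PySem.List.insertBy b x ys := by
  rfl

lemma insertBy_append_right {α : Type} (b : α → α → Bool) (x : α) (l1 l2 : List α)
    (h : ∀ y ∈ l1, b x y = false) :
    PySem.List.insertBy b x (l1 ++ l2) = l1 ++ PySem.List.insertBy b x l2 := by
  induction l1 with
  | nil => simp
  | cons y t ih =>
    rw [List.cons_append, insertBy_cons, h y (by simp), if_neg (by simp), ih (fun z hz => h z (by simp [hz]))]
    simp

lemma insertBy_append_left {α : Type} (b : α → α → Bool) (x : α) (l1 l2 : List α)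
    (h : ∀ y ∈ l2, b x y = true) :
    PySem.List.insertBy b x (l1 ++ l2) = PySem.List.insertBy b x l1 ++ l2 := by
  induction l1 with
  | nil =>
    cases l2 with
    | nil => simp
    | cons y t => simp [insertBy_cons, h y (by simp), PySem.List.insertBy]
  | cons y t ih =>
    rw [List.cons_append, insertBy_cons, insertBy_cons]
    split_ifs <;> simp [ih]

lemma insertBy_congr_mem {α : Type} (b b' : α → α → Bool) (x : α) (l : List α)
    (h : ∀ y ∈ l, b x y = b' x y) :
    PySem.List.insertBy b x l = PySem.List.insertBy b' x l := by
  induction l with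
  | nil => rfl
  | cons y t ih =>
    rw [insertBy_cons, insertBy_cons, h y (by simp), ih (fun z hz => h z (by simp [hz]))]

-- the lexicographic 'before' test used by PySem.List.sorted2 (reverse = false)
def pvLex {α : Type} (k1 k2 : α → Int) (a b : α) : Bool :=
  decide (k1 a < k1 b) || !decide (k1 b < k1 a) && decide (k2 a < k2 b)

lemma sorted2_eq_foldl {α : Type} (T : List α) (k1 k2 : α → Int) :
    PySem.List.sorted2 T k1 k2 false =
      T.foldl (fun acc x => PySem.List.insertBy (pvLex k1 k2) x acc) [] := rfl

lemma sorted_append_singleton {α : Type} (ys : List α) (x : α) (k2 : α → Int) :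
    PySem.List.sorted (ys ++ [x]) k2 false =
      PySem.List.insertBy (fun a b => decide (k2 a < k2 b)) x (PySem.List.sorted ys k2 false) := by
  rw [PySem.List.sorted_eq_foldl_insertBy, PySem.List.sorted_eq_foldl_insertBy, List.foldl_append]
  rfl

-- a lexicographic stable sort whose first key only takes the values 0,1,2 splits
-- into the three stably sorted groups, in ascending order of the first key
lemma sorted2_split {α : Type} (T : List α) (k1 k2 : α → Int)
    (h : ∀ x ∈ T, k1 x = 0 ∨ k1 x = 1 ∨ k1 x = 2) :
    PySem.List.sorted2 T k1 k2 false =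
      PySem.List.sorted (T.filter (fun x => k1 x == 0)) k2 false ++
      PySem.List.sorted (T.filter (fun x => k1 x == 1)) k2 false ++
      PySem.List.sorted (T.filter (fun x => k1 x == 2)) k2 false := by
  induction T using List.reverseRecOn with
  | nil => simp [sorted2_eq_foldl, PySem.List.sorted_eq_foldl_insertBy]
  | append_singleton T x ih =>
    have hT : ∀ y ∈ T, k1 y = 0 ∨ k1 y = 1 ∨ k1 y = 2 := fun y hy => h y (by simp [hy])
    have hx := h x (by simp)
    have m0 : ∀ y ∈ PySem.List.sorted (T.filter (fun x => k1 x == 0)) k2 false, k1 y = 0 := by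
      intro y hy
      have := (PySem.List.mem_sorted _ _ _ _).1 hy
      simpa using (List.mem_filter.1 this).2
    have m1 : ∀ y ∈ PySem.List.sorted (T.filter (fun x => k1 x == 1)) k2 false, k1 y = 1 := by
      intro y hy
      have := (PySem.List.mem_sorted _ _ _ _).1 hy
      simpa using (List.mem_filter.1 this).2
    have m2 : ∀ y ∈ PySem.List.sorted (T.filter (fun x => k1 x == 2)) k2 false, k1 y = 2 := by
      intro y hy
      have := (PySem.List.mem_sorted _ _ _ _).1 hy
      simpa using (List.mem_filter.1 this).2
    rw [sorted2_eq_foldl, List.foldl_append]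
    simp only [List.foldl_cons, List.foldl_nil]
    rw [← sorted2_eq_foldl, ih hT]
    simp only [List.filter_append, List.filter_cons, List.filter_nil]
    rcases hx with hx | hx | hx
    · -- k1 x = 0 : insert into the first block
      rw [List.append_assoc,
        insertBy_append_left _ _ _ _ (by
          intro y hy
          rcases List.mem_append.1 hy with hy | hy
          · simp [pvLex, hx, m1 y hy]
          · simp [pvLex, hx, m2 y hy]),
        insertBy_congr_mem _ (fun a b => decide (k2 a < k2 b)) _ _ (by
          intro y hy; simp [pvLex, hx, m0 y hy]),
        ← sorted_append_singleton]
      simp [hx]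
    · -- k1 x = 1 : skip the first block, insert into the second
      rw [List.append_assoc,
        insertBy_append_right _ _ _ _ (by intro y hy; simp [pvLex, hx, m0 y hy]),
        insertBy_append_left _ _ _ _ (by intro y hy; simp [pvLex, hx, m2 y hy]),
        insertBy_congr_mem _ (fun a b => decide (k2 a < k2 b)) _ _ (by
          intro y hy; simp [pvLex, hx, m1 y hy]),
        ← sorted_append_singleton]
      simp [hx]
    · -- k1 x = 2 : skip the first two blocks
      rw [List.append_assoc,
        insertBy_append_right _ _ _ _ (by intro y hy; simp [pvLex, hx, m0 y hy]),
        insertBy_append_right _ _ _ _ (by intro y hy; simp [pvLex, hx, m1 y hy]),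
        insertBy_congr_mem _ (fun a b => decide (k2 a < k2 b)) _ _ (by
          intro y hy; simp [pvLex, hx, m2 y hy]),
        ← sorted_append_singleton]
      simp [hx]

lemma insertBy_map {α β : Type} (f : α → β) (b : β → β → Bool) (x : α) (ys : List α) :
    PySem.List.insertBy b (f x) (ys.map f) =
      (PySem.List.insertBy (fun a c => b (f a) (f c)) x ys).map f := by
  induction ys with
  | nil => rfl
  | cons y t ih =>
    rw [List.map_cons, insertBy_cons, insertBy_cons]
    split_ifs <;> simp [ih]

-- a stable sort of a mapped list is the mapped stable sort under the composed key
lemma sorted_map_eq {α β : Type} (xs : List α) (f : α → β) (k2 : β → Int) :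
    PySem.List.sorted (xs.map f) k2 false =
      (PySem.List.sorted xs (fun m => k2 (f m)) false).map f := by
  rw [PySem.List.sorted_eq_foldl_insertBy, PySem.List.sorted_eq_foldl_insertBy]
  suffices hgen : ∀ (acc : List α),
      (xs.map f).foldl (fun acc x => PySem.List.insertBy (fun a b => decide (k2 a < k2 b)) x acc) (acc.map f)
      = (xs.foldl (fun acc x => PySem.List.insertBy (fun a b => decide (k2 (f a) < k2 (f b))) x acc) acc).map f by
    simpa using hgen []
  induction xs with
  | nil => simp
  | cons x t ih =>
    intro acc
    simp only [List.map_cons, List.foldl_cons]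
    rw [insertBy_map, ih]

-- ascending stable sort by the negated key is the descending stable sort by the key
lemma sorted_neg_eq_rev {α : Type} (xs : List α) (key : α → Int) :
    PySem.List.sorted xs (fun m => -key m) false = PySem.List.sorted xs key true := by
  rw [PySem.List.sorted_eq_foldl_insertBy, PySem.List.sorted_rev_eq_foldl_insertBy]
  have : (fun (a b : α) => decide (-key a < -key b)) = (fun a b => decide (key b < key a)) := by
    funext a b
    simp
  rw [this]

-- the per-move tag B's loop appends (none = move dropped)
def pvTag (m : String × (String × Int)) : Option ((Int × Int) × (String × (String × Int))) :=
  if m.2.1 == "mate" && decide (m.2.2 > 0) then some (((0 : Int), m.2.2), m)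
  else if m.2.1 == "cp" then some (((1 : Int), -m.2.2), m)
  else if m.2.1 == "mate" && decide (m.2.2 < 0) then some (((2 : Int), m.2.2), m)
  else none

lemma tag_filter_aux (m_list : List (String × (String × Int))) (g : Int)
    (f : (String × (String × Int)) → ((Int × Int) × (String × (String × Int))))
    (q : (String × (String × Int)) → Bool)
    (hf : ∀ m, pvTag m = some (f m) → (f m).1.1 = g ∧ q m = true)
    (hg : ∀ m a, pvTag m = some a → a.1.1 = g → a = f m)
    (hq : ∀ m, pvTag m = none → q m = false)
    (hne : ∀ m a, pvTag m = some a → a.1.1 ≠ g → q m = false) :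
    (m_list.filterMap pvTag).filter (fun t => t.1.1 == g) = (m_list.filter q).map f := by
  induction m_list with
  | nil => rfl
  | cons m t ih =>
    rw [List.filterMap_cons, List.filter_cons]
    cases hpt : pvTag m with
    | none => rw [hq m hpt]; simpa using ih
    | some a =>
      rw [List.filter_cons]
      by_cases ha : a.1.1 = g
      · obtain ⟨_, hqm⟩ := hf m (by rw [hpt, hg m a hpt ha])
        rw [hg m a hpt ha] at *
        simp [hqm, ha, ih]
      · rw [hne m a hpt ha]
        simpa [ha] using ih

lemma tag_filter0 (m_list : List (String × (String × Int))) :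
    (m_list.filterMap pvTag).filter (fun t => t.1.1 == (0 : Int)) =
      (m_list.filter (fun m => m.2.1 == "mate" && decide (m.2.2 > 0))).map (fun m => (((0 : Int), m.2.2), m)) := by
  apply tag_filter_aux <;> intro m <;> unfold pvTag <;> split_ifs <;> simp_all

lemma tag_filter1 (m_list : List (String × (String × Int))) :
    (m_list.filterMap pvTag).filter (fun t => t.1.1 == (1 : Int)) =
      (m_list.filter (fun m => m.2.1 == "cp")).map (fun m => (((1 : Int), -m.2.2), m)) := by
  apply tag_filter_aux <;> intro m <;> unfold pvTag <;> split_ifs <;> simp_all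

lemma tag_filter2 (m_list : List (String × (String × Int))) :
    (m_list.filterMap pvTag).filter (fun t => t.1.1 == (2 : Int)) =
      (m_list.filter (fun m => m.2.1 == "mate" && decide (m.2.2 < 0))).map (fun m => (((2 : Int), m.2.2), m)) := by
  apply tag_filter_aux <;> intro m <;> unfold pvTag <;> split_ifs <;> simp_all <;> omega

lemma tag_range (m_list : List (String × (String × Int))) :
    ∀ t ∈ m_list.filterMap pvTag, t.1.1 = 0 ∨ t.1.1 = 1 ∨ t.1.1 = 2 := by
  intro t ht
  obtain ⟨m, _, hm⟩ := List.mem_filterMap.1 ht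
  unfold pvTag at hm
  split_ifs at hm <;> cases hm <;> simp

-- A's accumulating loop builds the three filters of the input
lemma foldA_eq (m_list : List (String × (String × Int)))
    (a b c : List (String × (String × Int))) :
    m_list.foldl
      (fun (st : List (String × (String × Int)) × List (String × (String × Int)) × List (String × (String × Int))) m =>
        let st := if m.2.1 == "cp" then (st.1 ++ [m], st.2.1, st.2.2) else st
        let st := if m.2.1 == "mate" && decide (m.2.2 > 0) then (st.1, st.2.1 ++ [m], st.2.2) else st
        let st := if m.2.1 == "mate" && decide (m.2.2 < 0) then (st.1, st.2.1, st.2.2 ++ [m]) else st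
        st)
      (a, b, c)
    = (a ++ m_list.filter (fun m => m.2.1 == "cp"),
       b ++ m_list.filter (fun m => m.2.1 == "mate" && decide (m.2.2 > 0)),
       c ++ m_list.filter (fun m => m.2.1 == "mate" && decide (m.2.2 < 0))) := by
  induction m_list generalizing a b c with
  | nil => simp
  | cons m t ih =>
    simp only [List.foldl_cons, List.filter_cons]
    rw [ih]
    split_ifs <;> simp_all

-- B's accumulating loop builds the tagged filterMap of the input
lemma foldB_eq (m_list : List (String × (String × Int)))
    (acc : List ((Int × Int) × (String × (String × Int)))) :
    m_list.foldl
      (fun (acc : List ((Int × Int) × (String × (String × Int)))) m =>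
        if m.2.1 == "mate" && decide (m.2.2 > 0) then acc ++ [(((0 : Int), m.2.2), m)]
        else if m.2.1 == "cp" then acc ++ [(((1 : Int), -m.2.2), m)]
        else if m.2.1 == "mate" && decide (m.2.2 < 0) then acc ++ [(((2 : Int), m.2.2), m)]
        else acc)
      acc
    = acc ++ m_list.filterMap pvTag := by
  induction m_list generalizing acc with
  | nil => simp
  | cons m t ih =>
    simp only [List.foldl_cons, List.filterMap_cons]
    rw [ih]
    simp only [pvTag]
    split_ifs <;> simp

lemma sort_moves_eq_alt (m_list : List (String × (String × Int))) :
    sort_moves m_list = sort_moves_alt m_list := by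
  unfold sort_moves sort_moves_alt
  rw [foldA_eq, foldB_eq]
  simp only [List.nil_append]
  rw [sorted2_split _ _ _ (tag_range m_list)]
  simp only [List.map_append]
  rw [tag_filter0, tag_filter1, tag_filter2,
    sorted_map_eq, sorted_map_eq, sorted_map_eq, sorted_neg_eq_rev]
  simp [List.map_map, Function.comp_def]

-- ===== VERDICT (by name: the statement is the Claim_ definition above) =====
theorem sort_moves_spec : Claim_equal_sort_moves := by
  intro m_list _
  unfold Spec_sort_moves
  exact sort_moves_eq_alt m_list
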